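-- pv_equiv track=rewrite | github.com/epicarts/algorithm-study | baekjoon/2960/epicarts.py | solution
-- ===== SOURCE A (Python) =====
-- def solution(N, K):
-- 	sieve = [0] * (N + 1)
--
-- 	for i in range(2, N + 1): # 2 ~ N
-- 		for j in range(i, N + 1, i): # i 부터 N까지 i의 배수로
-- 			if sieve[j] != 1:
-- 				sieve[j] = 1
-- 				K-=1
-- 			if K == 0:
-- 				return j
-- ===== SOURCE B (Python) =====
-- def solution(N, K):
--     # Work on the sorted list of still-standing numbers: each round erases all
--     # remaining multiples of its smallest element p (necessarily prime), in
--     # increasing order, until the K-th erasure is reached.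
--     remaining = list(range(2, N + 1))
--     while remaining:
--         p = remaining[0]
--         erased_now = [x for x in remaining if x % p == 0]
--         if K <= len(erased_now):
--             return erased_now[K - 1]
--         K -= len(erased_now)
--         remaining = [x for x in remaining if x % p != 0]
-- ===== Notes on version B (the rewrite author's own statement) =====
-- stated objective: alternative
-- what changed: B discards the 0/1 sieve array and A's scan over every outer index i: it keeps the sorted list of still-standing numbers and, per round, erases all remaining multiples of its smallest element p (always a prime) at once by list filtering, returning directly by index when K falls inside a round; genuinely different data structure and loop shape, not faster (the per-round filters make it slower on large N).
-- outside the precondition, e.g. on solution(10, -1): A returns None, B returns 8; on solution(10, 20): A returns None, B returns None; on solution(1, 1): A returns None, B returns None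
import Mathlib
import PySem

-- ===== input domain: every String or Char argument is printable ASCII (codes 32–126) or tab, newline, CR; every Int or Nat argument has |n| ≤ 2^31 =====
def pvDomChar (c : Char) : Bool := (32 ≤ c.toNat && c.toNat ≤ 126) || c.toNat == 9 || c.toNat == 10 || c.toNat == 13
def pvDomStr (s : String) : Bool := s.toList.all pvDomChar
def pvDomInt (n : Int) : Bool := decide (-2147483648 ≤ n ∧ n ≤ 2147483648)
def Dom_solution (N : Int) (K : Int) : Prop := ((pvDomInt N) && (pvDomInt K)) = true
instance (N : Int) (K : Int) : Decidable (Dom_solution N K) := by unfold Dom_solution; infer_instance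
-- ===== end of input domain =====

-- B abandons A's 0/1 sieve array and its pass over every outer i: it keeps the sorted
-- list of still-standing numbers and, per round, erases all remaining multiples of the
-- smallest element at once by list filtering; same K-th erased number, no speed claimed.

-- ===== PORT A =====
-- inner loop 'for j in range(i, N+1, i)'; state (sieve, K); Sum.inr j = the 'return j'.
-- All indices j are ≥ 2 and ≤ N in any reachable access, so '.toNat' and 'getD' are
-- exact transcriptions of Python's sieve[j] here (no negative index, no IndexError).
def pvInnerA (js : List Int) (sieve : List Int) (K : Int) : (List Int × Int) ⊕ Int :=
  match js with
  | [] => Sum.inl (sieve, K)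
  | j :: rest =>
    if sieve.getD j.toNat 0 ≠ 1 then
      -- sieve[j] = 1; K -= 1
      let sieve' := sieve.set j.toNat 1
      if K - 1 == 0 then Sum.inr j else pvInnerA rest sieve' (K - 1)
    else
      if K == 0 then Sum.inr j else pvInnerA rest sieve K

-- outer loop 'for i in range(2, N+1)'.  Python falls off the end and returns None
-- when K is never exhausted; that is excluded by Pre_, the port returns 0 there.
def pvOuterA (is : List Int) (N : Int) (sieve : List Int) (K : Int) : Int :=
  match is with
  | [] => 0
  | i :: rest =>
    match pvInnerA (PySem.List.pyRange i (N + 1) i) sieve K with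
    | Sum.inr j => j
    | Sum.inl (s', K') => pvOuterA rest N s' K'

def solution (N : Int) (K : Int) : Int :=
  pvOuterA (PySem.List.pyRange 2 (N + 1) 1) N (List.replicate (N + 1).toNat (0 : Int)) K

-- ===== PORT B =====
-- B's while loop over the remaining list.  'erased_now[K - 1]' is PySem.List.pyGetD
-- (exact wherever Python returns).  Python's new remaining filters p :: rest; since
-- p % p == 0 whenever Python's '%' returns (p ≠ 0), p is always dropped there, so
-- filtering rest is the same list and gives the termination measure.  Python falls
-- off the loop (None) when K is never reached; excluded by Pre_, the port returns 0.
def pvLoopB (r : List Int) (K : Int) : Int :=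
  match r with
  | [] => 0
  | p :: rest =>
    let erased := (p :: rest).filter (fun x => PySem.Int.mod x p == 0)
    if K ≤ (erased.length : Int) then PySem.List.pyGetD erased (K - 1) 0
    else pvLoopB (rest.filter (fun x => !(PySem.Int.mod x p == 0))) (K - erased.length)
termination_by r.length
decreasing_by
  simp only [List.length_cons, List.length_unattach]
  exact Nat.lt_succ_of_le (le_trans (List.length_filter_le _ _) (le_of_eq (List.length_attach)))

def solution_alt (N : Int) (K : Int) : Int :=
  pvLoopB (PySem.List.pyRange 2 (N + 1) 1) K

-- ===== PRECONDITION & SPEC =====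
-- Pre_ excludes exactly the inputs on which the Python A falls off its loops and
-- returns None instead of an int: K outside the range of possible erasure counts
-- (K < 1, or K > N - 1 -- note K < N forces N > 1, so 0 < K ∧ K < N says exactly that).
def Pre_solution (N : Int) (K : Int) : Prop := 0 < K ∧ K < N
instance (N : Int) (K : Int) : Decidable (Pre_solution N K) := by
  unfold Pre_solution; infer_instance

def pvWitness_solution : Int × Int := (10, 4)

def Spec_solution (N : Int) (K : Int) (out : Int) : Prop := out = solution_alt N K
instance (N : Int) (K : Int) (out : Int) : Decidable (Spec_solution N K out) := by
  unfold Spec_solution; infer_instance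

-- ===== CLAIM (what is proved, stated in full; the proofs are below) =====
def Claim_equal_solution : Prop :=
  ∀ (N : Int) (K : Int), Dom_solution N K → Pre_solution N K → Spec_solution N K (solution N K)

-- ===== LEMMAS AND PROOFS =====

-- marking a batch of indices in A's sieve, back to front of the batch
def pvMark (s : List Int) (u : List Int) : List Int :=
  u.foldl (fun t j => t.set j.toNat 1) s

-- the marked set of A's sieve is closed under taking multiples (within the sieve)
def pvClosed (s : List Int) : Prop :=
  ∀ a b : Nat, a ∣ b → b ≠ 0 → b < s.length → s.getD a 0 = 1 → s.getD b 0 = 1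

theorem pv_getD_set {α : Type} (l : List α) (t u : Nat) (v d : α) :
    (l.set t v).getD u d = if t = u ∧ t < l.length then v else l.getD u d := by
  rw [List.getD, List.getD, List.getElem?_set]
  by_cases h1 : t = u
  · subst h1
    by_cases h2 : t < l.length <;> simp [h2]
  · simp [h1]

theorem pv_getD_replicate {α : Type} (n t : Nat) (v d : α) :
    (List.replicate n v).getD t d = if t < n then v else d := by
  rw [List.getD, List.getElem?_replicate]
  by_cases h : t < n <;> simp [h]

theorem pv_toNat_dvd {i j : Int} (hi : 0 ≤ i) (hj : 0 ≤ j) (h : i ∣ j) :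
    i.toNat ∣ j.toNat := by
  rwa [← Int.natCast_dvd_natCast, Int.toNat_of_nonneg hi, Int.toNat_of_nonneg hj]

theorem pvMark_length (u : List Int) (s : List Int) : (pvMark s u).length = s.length := by
  induction u generalizing s with
  | nil => rfl
  | cons j u ih => simp [pvMark, List.foldl_cons] at ih ⊢; rw [ih]; simp

theorem pvMark_getD (u : List Int) (s : List Int) (t : Nat) :
    (pvMark s u).getD t 0 = 1 ↔
      (s.getD t 0 = 1 ∨ ∃ j ∈ u, j.toNat = t ∧ t < s.length) := by
  induction u generalizing s with
  | nil => simp [pvMark]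
  | cons j u ih =>
    have step : pvMark s (j :: u) = pvMark (s.set j.toNat 1) u := rfl
    rw [step, ih]
    rw [pv_getD_set]
    constructor
    · rintro (hc | ⟨x, hx, rfl, hxl⟩)
      · by_cases hcase : j.toNat = t ∧ j.toNat < s.length
        · exact Or.inr ⟨j, by simp, hcase.1, hcase.1 ▸ hcase.2⟩
        · rw [if_neg hcase] at hc; exact Or.inl hc
      · simp only [List.length_set] at hxl
        exact Or.inr ⟨x, by simp [hx], rfl, hxl⟩
    · rintro (hc | ⟨x, hx, rfl, hxl⟩)
      · by_cases hcase : j.toNat = t ∧ j.toNat < s.length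
        · exact Or.inl (by rw [if_pos hcase])
        · rw [if_neg hcase]; exact Or.inl hc
      · rcases List.mem_cons.mp hx with rfl | hx'
        · exact Or.inl (by simp [hxl])
        · exact Or.inr ⟨x, by simp [hx'], rfl, by simpa using hxl⟩

-- A's inner pass over js, with K still positive: it returns the K-th element of the
-- not-yet-marked sublist u of js if K ≤ |u|, else marks exactly u and subtracts |u|.
theorem pvInnerA_round (js : List Int) (s : List Int) (K : Int)
    (hK : 1 ≤ K) (hd : js.Pairwise (fun a b => a.toNat ≠ b.toNat)) :
    pvInnerA js s K =
      (if K ≤ ((js.filter (fun j => !(s.getD j.toNat 0 == 1))).length : Int) then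
        Sum.inr ((js.filter (fun j => !(s.getD j.toNat 0 == 1))).getD (K - 1).toNat 0)
      else
        Sum.inl (pvMark s (js.filter (fun j => !(s.getD j.toNat 0 == 1))),
          K - (js.filter (fun j => !(s.getD j.toNat 0 == 1))).length)) := by
  induction js generalizing s K with
  | nil =>
    simp only [pvInnerA, List.filter_nil, List.length_nil]
    rw [if_neg (by exact_mod_cast by omega)]
    simp [pvMark]
  | cons j rest ih =>
    rcases List.pairwise_cons.mp hd with ⟨hj, hd'⟩
    by_cases hm : s.getD j.toNat 0 = 1
    · have hpred : (!(s.getD j.toNat 0 == 1)) = false := by rw [hm]; simp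
      rw [List.filter_cons_of_neg (by rw [hpred]; simp)]
      have hA : pvInnerA (j :: rest) s K = pvInnerA rest s K := by
        rw [pvInnerA, if_neg (not_not_intro hm),
          if_neg (show ¬((K == 0) = true) by simpa using (by omega : K ≠ 0))]
      rw [hA]
      exact ih s K hK hd'
    · have hpred : (!(s.getD j.toNat 0 == 1)) = true := by
        have : (s.getD j.toNat 0 == 1) = false := by simpa using hm
        rw [this]; rfl
      rw [List.filter_cons_of_pos (by exact hpred)]
      by_cases h1 : K = 1
      · subst h1
        have hA : pvInnerA (j :: rest) s 1 = Sum.inr j := by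
          rw [pvInnerA, if_pos hm, if_pos (by simp)]
        rw [hA, if_pos (by simp only [List.length_cons]; push_cast; omega)]
        simp
      · have hK2 : 2 ≤ K := by omega
        have hA : pvInnerA (j :: rest) s K = pvInnerA rest (s.set j.toNat 1) (K - 1) := by
          rw [pvInnerA, if_pos hm,
            if_neg (show ¬((K - 1 == 0) = true) by simpa using (by omega : K - 1 ≠ 0))]
        rw [hA, ih (s.set j.toNat 1) (K - 1) (by omega) hd']
        have hfe : rest.filter (fun x => !((s.set j.toNat 1).getD x.toNat 0 == 1))
            = rest.filter (fun x => !(s.getD x.toNat 0 == 1)) := by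
          refine List.filter_congr (fun x hx => ?_)
          rw [pv_getD_set]
          rw [if_neg (fun hc => hj x hx hc.1)]
        rw [hfe]
        by_cases hle : K - 1 ≤ ((rest.filter (fun x => !(s.getD x.toNat 0 == 1))).length : Int)
        · rw [if_pos hle, if_pos (by simp only [List.length_cons]; push_cast; omega)]
          have hidx : (K - 1).toNat = (K - 1 - 1).toNat + 1 := by omega
          rw [hidx]
          simp
        · rw [if_neg hle, if_neg (by simp only [List.length_cons]; push_cast; omega)]
          have hmk : pvMark s (j :: rest.filter (fun x => !(s.getD x.toNat 0 == 1)))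
              = pvMark (s.set j.toNat 1) (rest.filter (fun x => !(s.getD x.toNat 0 == 1))) := rfl
          rw [hmk]
          simp only [Sum.inl.injEq, Prod.mk.injEq, List.length_cons]
          refine ⟨trivial, ?_⟩
          push_cast
          omega

theorem pv_sorted_ext (l1 : List Int) : ∀ (l2 : List Int), l1.Pairwise (· < ·) →
    l2.Pairwise (· < ·) → (∀ x, x ∈ l1 ↔ x ∈ l2) → l1 = l2 := by
  induction l1 with
  | nil =>
    intro l2 _ _ h
    exact (List.eq_nil_iff_forall_not_mem.mpr (fun a ha => by simpa using (h a).mpr ha)).symm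
  | cons a l1 ih =>
    intro l2 h1 h2 h
    rcases List.pairwise_cons.mp h1 with ⟨ha1, h1'⟩
    have haZ : a ∈ l2 := (h a).mp (by simp)
    cases l2 with
    | nil => simp at haZ
    | cons b l2 =>
      rcases List.pairwise_cons.mp h2 with ⟨hb2, h2'⟩
      have hbZ : b ∈ a :: l1 := (h b).mpr (by simp)
      have hab : a = b := by
        rcases List.mem_cons.mp haZ with h' | h'
        · exact h'
        · rcases List.mem_cons.mp hbZ with h'' | h''
          · exact h''.symm
          · have := ha1 b h''
            have := hb2 a h'
            omega
      subst hab
      congr 1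
      refine ih l2 h1' h2' (fun x => ⟨fun hx => ?_, fun hx => ?_⟩)
      · have := ha1 x hx
        rcases List.mem_cons.mp ((h x).mp (by simp [hx])) with rfl | h' 
        · omega
        · exact h'
      · have := hb2 x hx
        rcases List.mem_cons.mp ((h x).mpr (by simp [hx])) with rfl | h'
        · omega
        · exact h'

theorem pv_pyRange_pairwise (a b s : Int) (hs : 0 < s) :
    (PySem.List.pyRange a b s).Pairwise (· < ·) := by
  rw [PySem.List.pyRange_of_pos a b hs]
  refine List.pairwise_map.mpr (List.Pairwise.imp_of_mem (fun {k l} _ _ hkl => ?_)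
    List.pairwise_lt_range)
  have : s * (k : Int) < s * (l : Int) :=
    Int.mul_lt_mul_of_pos_left (by exact_mod_cast hkl) hs
  omega

theorem pv_dvd_sub_self (i x : Int) : i ∣ x - i ↔ i ∣ x := by
  constructor
  · intro h; have := dvd_add h (dvd_refl i); simpa using this
  · intro h; exact dvd_sub h (dvd_refl i)

-- closedness is preserved by marking all unmarked multiples of p up to N
theorem pvClosed_after (s : List Int) (p N : Int) (u : List Int)
    (_hp : 2 ≤ p) (hlen : s.length = (N + 1).toNat) (hcl : pvClosed s)
    (hu : ∀ x, x ∈ u ↔ 2 ≤ x ∧ x ≤ N ∧ ¬ s.getD x.toNat 0 = 1 ∧ p ∣ x) :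
    pvClosed (pvMark s u) := by
  intro a b hab hb0 hbl ha1
  rw [pvMark_length] at hbl
  rw [hlen] at hbl
  rw [pvMark_getD] at ha1 ⊢
  rcases ha1 with ha | ⟨j, hj, rfl, hjl⟩
  · exact Or.inl (hcl a b hab hb0 (by omega) ha)
  · obtain ⟨hj2, hjN, hjum, hjdvd⟩ := (hu j).mp hj
    have hjb : j.toNat ∣ b := hab
    have hbge : j.toNat ≤ b := Nat.le_of_dvd (Nat.pos_of_ne_zero hb0) hjb
    have hpb : p ∣ (b : Int) := by
      refine dvd_trans hjdvd ?_
      have := Int.natCast_dvd_natCast.mpr hjb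
      rwa [Int.toNat_of_nonneg (by omega : (0:Int) ≤ j)] at this
    by_cases hbm : s.getD b 0 = 1
    · exact Or.inl hbm
    · refine Or.inr ⟨(b : Int), ?_, by simp, by omega⟩
      refine (hu (b : Int)).mpr ⟨by omega, by omega, ?_, hpb⟩
      simpa using hbm

-- the coupling: A's outer sweep from i with sieve s equals B's loop on the sorted
-- list r of unmarked numbers in [2, N], provided everything below i is marked,
-- the marked set is multiple-closed, and at least one more erasure is requested.
theorem pv_main (N : Int) : ∀ (n : Nat) (i K : Int) (s : List Int) (r : List Int),
    (N + 1 - i).toNat ≤ n → 2 ≤ i → 1 ≤ K →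
    s.length = (N + 1).toNat → pvClosed s →
    r.Pairwise (· < ·) → (∀ x ∈ r, i ≤ x) →
    (∀ x, x ∈ r ↔ 2 ≤ x ∧ x ≤ N ∧ ¬ s.getD x.toNat 0 = 1) →
    pvOuterA (PySem.List.pyRange i (N + 1) 1) N s K = pvLoopB r K := by
  intro n
  induction n with
  | zero =>
    intro i K s r hn hi hK hlen hcl hsort hge hmem
    have hiN : N + 1 ≤ i := by omega
    rw [PySem.List.pyRange_one_eq_nil hiN]
    have hr : r = [] := List.eq_nil_iff_forall_not_mem.mpr (fun x hx => by
      have h1 := hge x hx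
      have h2 := ((hmem x).mp hx).2.1
      omega)
    subst hr
    simp [pvOuterA, pvLoopB]
  | succ n ih =>
    intro i K s r hn hi hK hlen hcl hsort hge hmem
    by_cases hiN : N + 1 ≤ i
    · rw [PySem.List.pyRange_one_eq_nil hiN]
      have hr : r = [] := List.eq_nil_iff_forall_not_mem.mpr (fun x hx => by
        have h1 := hge x hx
        have h2 := ((hmem x).mp hx).2.1
        omega)
      subst hr
      simp [pvOuterA, pvLoopB]
    · have hiN' : i < N + 1 := by omega
      rw [PySem.List.pyRange_one_cons hiN']
      have hipos : (0:Int) < i := by omega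
      -- A's inner pass, characterised by pvInnerA_round
      have hd : (PySem.List.pyRange i (N + 1) i).Pairwise (fun a b => a.toNat ≠ b.toNat) := by
        refine List.Pairwise.imp_of_mem (fun {a b} hamem _ hab => ?_)
          (pv_pyRange_pairwise i (N + 1) i hipos)
        have ha := (PySem.List.mem_pyRange_iff_of_pos hipos a).mp hamem
        omega
      have hmemJ : ∀ j, j ∈ PySem.List.pyRange i (N + 1) i ↔ i ≤ j ∧ j ≤ N ∧ i ∣ j := by
        intro j
        rw [PySem.List.mem_pyRange_iff_of_pos hipos, pv_dvd_sub_self]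
        omega
      simp only [pvOuterA]
      rw [pvInnerA_round _ s K hK hd]
      by_cases hm : s.getD i.toNat 0 = 1
      · -- i already marked: by closedness every listed multiple is marked, no-op round
        have hnil : (PySem.List.pyRange i (N + 1) i).filter
            (fun j => !(s.getD j.toNat 0 == 1)) = [] := by
          rw [List.filter_eq_nil_iff]
          intro j hj
          obtain ⟨h1, h2, h3⟩ := (hmemJ j).mp hj
          have : s.getD j.toNat 0 = 1 :=
            hcl i.toNat j.toNat (pv_toNat_dvd (by omega) (by omega) h3)
              (by omega) (by omega) hm
          rw [this]; simp
        rw [hnil]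
        rw [if_neg (by simpa using (by omega : ¬ K ≤ (0:Int)))]
        have hnoop : pvMark s ([] : List Int) = s := rfl
        rw [hnoop]
        simp only [List.length_nil, Nat.cast_zero, sub_zero]
        refine ih (i + 1) K s r (by omega) (by omega) hK hlen hcl hsort ?_ hmem
        intro x hx
        have h1 := hge x hx
        have h2 : ¬ s.getD x.toNat 0 = 1 := ((hmem x).mp hx).2.2
        have hxi : x ≠ i := fun h => h2 (h ▸ hm)
        omega
      · -- i unmarked: i is the head of r, and this is one full round of B
        have hir : i ∈ r := (hmem i).mpr ⟨by omega, by omega, hm⟩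
        cases r with
        | nil => simp at hir
        | cons p rest =>
          rcases List.pairwise_cons.mp hsort with ⟨hp1, hsort'⟩
          have hpi : i = p := by
            have hip : i ≤ p := hge p (by simp)
            rcases List.mem_cons.mp hir with h' | h'
            · omega
            · have := hp1 i h'
              omega
          subst hpi
          -- the unmarked multiples of i in js equal B's erased_now filter of r
          have hueq : (PySem.List.pyRange i (N + 1) i).filter
                (fun j => !(s.getD j.toNat 0 == 1))
              = (i :: rest).filter (fun x => PySem.Int.mod x i == 0) := by
            refine pv_sorted_ext _ _
              (List.Pairwise.filter _ (pv_pyRange_pairwise i (N + 1) i hipos))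
              (List.Pairwise.filter _ hsort) (fun x => ?_)
            rw [List.mem_filter, List.mem_filter, hmemJ]
            have hmq : (PySem.Int.mod x i == 0) = true ↔ i ∣ x := by
              simp [PySem.Int.mod_eq_zero_iff_dvd]
            constructor
            · rintro ⟨⟨h1, h2, h3⟩, h4⟩
              refine ⟨(hmem x).mpr ⟨by omega, h2, by simpa using h4⟩, hmq.mpr h3⟩
            · rintro ⟨h1, h2⟩
              obtain ⟨h3, h4, h5⟩ := (hmem x).mp h1
              exact ⟨⟨hge x h1, h4, hmq.mp h2⟩, by simpa using h5⟩
          rw [hueq]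
          rw [pvLoopB]
          by_cases hle : K ≤ (((i :: rest).filter (fun x => PySem.Int.mod x i == 0)).length : Int)
          · rw [if_pos hle, if_pos hle]
            rw [PySem.List.pyGetD_of_nonneg _ _ (by omega : (0:Int) ≤ K - 1)]
          · rw [if_neg hle, if_neg hle]
            -- else branch: one more outer round of A, one more round of B
            set u := (i :: rest).filter (fun x => PySem.Int.mod x i == 0) with hu_def
            have huchar : ∀ x, x ∈ u ↔ 2 ≤ x ∧ x ≤ N ∧ ¬ s.getD x.toNat 0 = 1 ∧ i ∣ x := by
              intro x
              rw [hu_def, List.mem_filter]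
              constructor
              · rintro ⟨h1, h2⟩
                obtain ⟨h3, h4, h5⟩ := (hmem x).mp h1
                exact ⟨h3, h4, h5, by simpa [PySem.Int.mod_eq_zero_iff_dvd] using h2⟩
              · rintro ⟨h1, h2, h3, h4⟩
                exact ⟨(hmem x).mpr ⟨h1, h2, h3⟩,
                  by simpa [PySem.Int.mod_eq_zero_iff_dvd] using h4⟩
            have hiu : i ∈ u := (huchar i).mpr ⟨by omega, by omega, hm, dvd_refl i⟩
            have hKu : 1 ≤ K - (u.length : Int) := by
              omega
            refine ih (i + 1) (K - u.length) (pvMark s u)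
              (rest.filter (fun x => !(PySem.Int.mod x i == 0)))
              (by omega) (by omega) hKu (by rw [pvMark_length]; exact hlen)
              (pvClosed_after s i N u (by omega) hlen hcl huchar)
              (List.Pairwise.filter _ hsort') ?_ ?_
            · intro x hx
              have hx' : x ∈ rest := List.mem_of_mem_filter hx
              have := hp1 x hx'
              omega
            · intro x
              rw [List.mem_filter]
              constructor
              · rintro ⟨h1, h2⟩
                have hxr : x ∈ i :: rest := by simp [h1]
                obtain ⟨h3, h4, h5⟩ := (hmem x).mp hxr
                have hnd : ¬ i ∣ x := by simpa [PySem.Int.mod_eq_zero_iff_dvd] using h2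
                refine ⟨h3, h4, ?_⟩
                rw [pvMark_getD]
                rintro (hc | ⟨j, hj, hjt, _⟩)
                · exact h5 hc
                · have hj4 := (huchar j).mp hj
                  have hjx : j = x := by
                    have : (0:Int) ≤ j := by omega
                    have : (0:Int) ≤ x := by omega
                    omega
                  subst hjx
                  exact hnd hj4.2.2.2
              · rintro ⟨h1, h2, h3⟩
                rw [pvMark_getD] at h3
                have h3s : ¬ s.getD x.toNat 0 = 1 := fun hc => h3 (Or.inl hc)
                have h3u : ¬ ∃ j ∈ u, j.toNat = x.toNat ∧ x.toNat < s.length :=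
                  fun he => h3 (Or.inr he)
                have hxr : x ∈ i :: rest := (hmem x).mpr ⟨h1, h2, h3s⟩
                have hxlen : x.toNat < s.length := by rw [hlen]; omega
                have hxnu : x ∉ u := fun hxu => h3u ⟨x, hxu, rfl, hxlen⟩
                have hxnd : ¬ i ∣ x := fun hd =>
                  hxnu ((huchar x).mpr ⟨h1, h2, h3s, hd⟩)
                have hxi : x ≠ i := fun h => hxnd (h ▸ dvd_refl i)
                have hxrest : x ∈ rest := by
                  rcases List.mem_cons.mp hxr with h' | h'
                  · exact absurd h' hxi
                  · exact h'
                exact ⟨hxrest, by simpa [PySem.Int.mod_eq_zero_iff_dvd] using hxnd⟩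

-- ===== VERDICT (by name: the statement is the Claim_ definition above) =====
theorem solution_spec : Claim_equal_solution := by
  intro N K _ hpre
  obtain ⟨hK, hKN⟩ := hpre
  unfold Spec_solution solution solution_alt
  refine pv_main N (N + 1 - 2).toNat 2 K _ _ (le_refl _) (by omega) (by omega) (by simp) ?_
    (PySem.List.pairwise_lt_pyRange_one 2 (N + 1)) ?_ ?_
  · intro a b _ _ _ ha
    rw [pv_getD_replicate] at ha
    by_cases h : a < (N + 1).toNat <;> simp [h] at ha
  · intro x hx
    exact ((PySem.List.mem_pyRange_one).mp hx).1
  · intro x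
    rw [PySem.List.mem_pyRange_one]
    constructor
    · rintro ⟨h1, h2⟩
      refine ⟨h1, by omega, ?_⟩
      rw [pv_getD_replicate]
      split_ifs <;> simp
    · rintro ⟨h1, h2, _⟩
      exact ⟨h1, by omega⟩
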